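-- pv_equiv track=rewrite | github.com/MDGSpace-SoC-2023/playboard-AI | 2048_mcts/2048_AI.py | matrix_shift
-- ===== SOURCE A (Python) =====
-- def matrix_shift(matrix):
--     new_matrix = [[0] * 4 for _ in range(4)]
--     for i in range(4):
--         fill_position = 0
--         for j in range(4):
--             if matrix[i][j] != 0:
--                 new_matrix[i][fill_position] = matrix[i][j]
--                 fill_position += 1
--     return new_matrix
-- ===== SOURCE B (Python) =====
-- def matrix_shift(matrix):
--     return [sorted(matrix[i][:4], key=lambda x: x == 0) for i in range(4)]
-- ===== Notes on version B (the rewrite author's own statement) =====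
-- stated objective: idiomatic
-- what changed: Replaces the preallocated 4x4 zero matrix with an explicit fill-pointer pass by a one-line comprehension that stably sorts each row's first four entries on the key (x == 0), which moves zeros to the end while keeping nonzero order.
import Mathlib
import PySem

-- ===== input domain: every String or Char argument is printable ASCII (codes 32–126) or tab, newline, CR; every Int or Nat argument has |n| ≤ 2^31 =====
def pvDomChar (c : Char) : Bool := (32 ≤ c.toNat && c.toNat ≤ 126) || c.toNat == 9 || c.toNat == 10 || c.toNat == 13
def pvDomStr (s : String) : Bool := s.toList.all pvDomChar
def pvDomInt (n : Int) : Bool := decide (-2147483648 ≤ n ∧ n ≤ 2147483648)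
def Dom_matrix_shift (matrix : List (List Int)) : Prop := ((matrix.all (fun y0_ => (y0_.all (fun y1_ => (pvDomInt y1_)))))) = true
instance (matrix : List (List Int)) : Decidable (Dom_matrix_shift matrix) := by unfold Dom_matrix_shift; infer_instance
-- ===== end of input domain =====

-- B replaces A's fill-pointer pass over a preallocated 4x4 zero matrix by a stable sort
-- of each row's first four entries on the key (x == 0); same result, more idiomatic.


-- ===== PORT A =====
-- matrix[i] / matrix[i][j]; Pre_ guarantees the index is in range (Python raises otherwise,
-- and exactly those inputs are excluded by Pre_), so the .getD default is never reached there.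
def pvRowAt (m : List (List Int)) (i : Int) : List Int := PySem.List.pyGetD m i []
def pvEltAt (row : List Int) (j : Int) : Int := PySem.List.pyGetD row j 0

-- new_matrix[i] is only written during iteration i of the outer loop, so the outer loop is a
-- map over i producing row i; the inner loop is a fold over j carrying (row, fill_position).
def matrix_shift (matrix : List (List Int)) : List (List Int) :=
  (PySem.List.pyRange 0 4 1).map (fun i =>
    let row := pvRowAt matrix i
    let st := (PySem.List.pyRange 0 4 1).foldl
      (fun (st : List Int × Nat) j =>
        let v := pvEltAt row j
        if v ≠ 0 then (st.1.set st.2 v, st.2 + 1) else st)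
      (List.replicate 4 0, 0)
    st.1)

-- ===== PORT B =====
-- [sorted(matrix[i][:4], key=lambda x: x == 0) for i in range(4)]  (False < True, sort is stable)
def matrix_shift_alt (matrix : List (List Int)) : List (List Int) :=
  (PySem.List.pyRange 0 4 1).map (fun i =>
    PySem.List.sorted (PySem.List.slice (pvRowAt matrix i) (some 0) (some 4))
      (fun x => if x = 0 then (1 : Nat) else 0) false)

-- ===== PRECONDITION & SPEC =====
-- Pre_ excludes exactly the inputs where A raises IndexError: fewer than 4 rows, or one of
-- the first 4 rows shorter than 4.
def Pre_matrix_shift (matrix : List (List Int)) : Prop :=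
  4 ≤ matrix.length ∧ ∀ row ∈ matrix.take 4, 4 ≤ row.length
instance (matrix : List (List Int)) : Decidable (Pre_matrix_shift matrix) := by unfold Pre_matrix_shift; infer_instance
def pvWitness_matrix_shift : List (List Int) :=
  [[0, 2, 0, 4], [1, 0, 0, 0], [0, 0, 0, 0], [5, 6, 7, 8]]

def Spec_matrix_shift (matrix : List (List Int)) (out : List (List Int)) : Prop := out = matrix_shift_alt matrix
instance (matrix : List (List Int)) (out : List (List Int)) : Decidable (Spec_matrix_shift matrix out) := by unfold Spec_matrix_shift; infer_instance

-- ===== CLAIM (what is proved, stated in full; the proofs are below) =====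
def Claim_equal_matrix_shift : Prop := ∀ (matrix : List (List Int)), Dom_matrix_shift matrix → Pre_matrix_shift matrix → Spec_matrix_shift matrix (matrix_shift matrix)

-- ===== LEMMAS AND PROOFS =====

-- the per-row core: fill-pointer compaction of the first four entries = stable sort on the zero key
lemma pv_row_eq (a b c d : Int) (t : List Int) :
    (([0, 1, 2, 3] : List Int).foldl
      (fun (st : List Int × Nat) j =>
        let v := pvEltAt (a :: b :: c :: d :: t) j
        if v ≠ 0 then (st.1.set st.2 v, st.2 + 1) else st)
      (List.replicate 4 0, 0)).1
    = PySem.List.sorted [a, b, c, d] (fun x => if x = 0 then (1 : Nat) else 0) false := by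
  have e0 : pvEltAt (a::b::c::d::t) 0 = a := by rw [pvEltAt, PySem.List.pyGetD_ofNat' _ 0 _]; rfl
  have e1 : pvEltAt (a::b::c::d::t) 1 = b := by rw [pvEltAt, PySem.List.pyGetD_ofNat' _ 1 _]; rfl
  have e2 : pvEltAt (a::b::c::d::t) 2 = c := by rw [pvEltAt, PySem.List.pyGetD_ofNat' _ 2 _]; rfl
  have e3 : pvEltAt (a::b::c::d::t) 3 = d := by rw [pvEltAt, PySem.List.pyGetD_ofNat' _ 3 _]; rfl
  simp only [List.foldl, e0, e1, e2, e3]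
  by_cases ha : a = 0 <;> by_cases hb : b = 0 <;> by_cases hc : c = 0 <;> by_cases hd : d = 0 <;>
    simp [PySem.List.sorted, PySem.List.insertBy, List.set, List.replicate, ha, hb, hc, hd]

-- the first four entries of a long-enough row, as Python's row[:4]
lemma pv_slice4 (a b c d : Int) (t : List Int) :
    PySem.List.slice (a :: b :: c :: d :: t) (some 0) (some 4) = [a, b, c, d] := by
  simp [PySem.List.slice]

-- ===== VERDICT (by name: the statement is the Claim_ definition above) =====
theorem matrix_shift_spec : Claim_equal_matrix_shift := by
  intro matrix _ hpre
  obtain ⟨hlen, hrows⟩ := hpre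
  match matrix, hlen with
  | r0 :: r1 :: r2 :: r3 :: rest, _ =>
    have h0 := hrows r0 (by simp)
    have h1 := hrows r1 (by simp)
    have h2 := hrows r2 (by simp)
    have h3 := hrows r3 (by simp)
    match r0, h0 with
    | a0 :: b0 :: c0 :: d0 :: t0, _ =>
    match r1, h1 with
    | a1 :: b1 :: c1 :: d1 :: t1, _ =>
    match r2, h2 with
    | a2 :: b2 :: c2 :: d2 :: t2, _ =>
    match r3, h3 with
    | a3 :: b3 :: c3 :: d3 :: t3, _ =>
      unfold Spec_matrix_shift matrix_shift matrix_shift_alt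
      have hR : PySem.List.pyRange 0 4 1 = [0, 1, 2, 3] := by decide
      rw [hR]
      have g0 : pvRowAt ((a0::b0::c0::d0::t0) :: (a1::b1::c1::d1::t1) :: (a2::b2::c2::d2::t2) :: (a3::b3::c3::d3::t3) :: rest) 0 = (a0::b0::c0::d0::t0) := by
        rw [pvRowAt, PySem.List.pyGetD_ofNat' _ 0 _]; rfl
      have g1 : pvRowAt ((a0::b0::c0::d0::t0) :: (a1::b1::c1::d1::t1) :: (a2::b2::c2::d2::t2) :: (a3::b3::c3::d3::t3) :: rest) 1 = (a1::b1::c1::d1::t1) := by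
        rw [pvRowAt, PySem.List.pyGetD_ofNat' _ 1 _]; rfl
      have g2 : pvRowAt ((a0::b0::c0::d0::t0) :: (a1::b1::c1::d1::t1) :: (a2::b2::c2::d2::t2) :: (a3::b3::c3::d3::t3) :: rest) 2 = (a2::b2::c2::d2::t2) := by
        rw [pvRowAt, PySem.List.pyGetD_ofNat' _ 2 _]; rfl
      have g3 : pvRowAt ((a0::b0::c0::d0::t0) :: (a1::b1::c1::d1::t1) :: (a2::b2::c2::d2::t2) :: (a3::b3::c3::d3::t3) :: rest) 3 = (a3::b3::c3::d3::t3) := by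
        rw [pvRowAt, PySem.List.pyGetD_ofNat' _ 3 _]; rfl
      simp only [List.map_cons, List.map_nil, g0, g1, g2, g3, pv_slice4, pv_row_eq]
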